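-- pv_equiv track=rewrite | github.com/baesh3744/algorithm-solutions | baekjoon/05000/5430.py | analyze_commands
-- ===== SOURCE A (Python) =====
-- def analyze_commands(p: str, n: int) -> tuple[int, int, int]:
--     is_reversed: bool = False
--     start_idx: int = 0
--     end_idx: int = n - 1
--
--     for cmd in p:
--         if cmd == 'R':
--             is_reversed = not is_reversed
--         else:
--             if not is_reversed:
--                 start_idx += 1
--             else:
--                 end_idx -= 1
--
--     return start_idx, end_idx, is_reversed
-- ===== SOURCE B (Python) =====
-- def analyze_commands(p: str, n: int) -> tuple[int, int, int]:
--     # Segment view: split on 'R'; even-indexed segments consume from the front,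
--     # odd-indexed ones from the back; final orientation = parity of R count.
--     segments = p.split('R')
--     start_idx = 0
--     end_idx = n - 1
--     for i, seg in enumerate(segments):
--         if i % 2 == 0:
--             start_idx += len(seg)
--         else:
--             end_idx -= len(seg)
--     return start_idx, end_idx, (len(segments) - 1) % 2 == 1
-- ===== Notes on version B (the rewrite author's own statement) =====
-- stated objective: alternative
-- what changed: Replaces A's per-character loop with a mutable reversal flag by splitting the command string on 'R' and parity-aggregating segment lengths (even-indexed segments advance start_idx, odd-indexed retreat end_idx), with the final orientation read off as the parity of the R count.
import Mathlib
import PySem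

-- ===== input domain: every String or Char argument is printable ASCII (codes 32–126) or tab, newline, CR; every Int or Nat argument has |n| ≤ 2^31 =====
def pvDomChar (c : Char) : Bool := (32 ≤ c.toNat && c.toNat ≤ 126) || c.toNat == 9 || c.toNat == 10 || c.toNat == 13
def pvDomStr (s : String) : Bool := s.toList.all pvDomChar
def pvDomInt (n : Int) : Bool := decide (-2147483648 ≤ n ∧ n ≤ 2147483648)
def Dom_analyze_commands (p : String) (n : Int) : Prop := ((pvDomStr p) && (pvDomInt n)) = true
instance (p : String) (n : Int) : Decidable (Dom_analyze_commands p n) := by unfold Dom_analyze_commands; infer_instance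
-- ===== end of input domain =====

-- B replaces A's per-character reversal flag by a segment view: split on 'R' and
-- parity-aggregate segment lengths (objective: alternative decomposition, same O(n) cost).

-- ===== PORT A =====
-- the per-character fold: state is (is_reversed, start_idx, end_idx)
def pvAStep (s : Bool × Int × Int) (c : Char) : Bool × Int × Int :=
  if c = 'R' then (!s.1, s.2.1, s.2.2)
  else if !s.1 then (s.1, s.2.1 + 1, s.2.2) else (s.1, s.2.1, s.2.2 - 1)

def analyze_commands (p : String) (n : Int) : Int × Int × Bool :=
  ((p.toList.foldl pvAStep (false, 0, n - 1)).2.1,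
   (p.toList.foldl pvAStep (false, 0, n - 1)).2.2,
   (p.toList.foldl pvAStep (false, 0, n - 1)).1)

-- ===== PORT B =====
-- hand port of p.split('R') for the single-character separator 'R'
-- (exact: Python's split keeps empty segments and yields [''] on the empty string)
def pvSplitR : List Char → List (List Char)
  | [] => [[]]
  | c :: t =>
    if c = 'R' then [] :: pvSplitR t
    else
      match pvSplitR t with
      | [] => [[c]]          -- unreachable: pvSplitR never returns []
      | h :: r => (c :: h) :: r

-- the loop over enumerate(segments): state is (start_idx, end_idx)
def pvBStep (s : Int × Int) (iseg : Int × List Char) : Int × Int :=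
  if PySem.Int.mod iseg.1 2 == 0 then (s.1 + (iseg.2.length : Int), s.2)
  else (s.1, s.2 - (iseg.2.length : Int))

def analyze_commands_alt (p : String) (n : Int) : Int × Int × Bool :=
  (((PySem.List.enumerate (pvSplitR p.toList) 0).foldl pvBStep (0, n - 1)).1,
   ((PySem.List.enumerate (pvSplitR p.toList) 0).foldl pvBStep (0, n - 1)).2,
   PySem.Int.mod (((pvSplitR p.toList).length : Int) - 1) 2 == 1)

-- ===== PRECONDITION & SPEC =====
def Spec_analyze_commands (p : String) (n : Int) (out : Int × Int × Bool) : Prop := out = analyze_commands_alt p n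
instance (p : String) (n : Int) (out : Int × Int × Bool) : Decidable (Spec_analyze_commands p n out) := by unfold Spec_analyze_commands; infer_instance

-- ===== CLAIM (what is proved, stated in full; the proofs are below) =====
def Claim_equal_analyze_commands : Prop := ∀ (p : String) (n : Int), Dom_analyze_commands p n → Spec_analyze_commands p n (analyze_commands p n)

-- ===== LEMMAS AND PROOFS =====

-- parity-flag version of B's loop (proof device)
def pvBFoldP (segs : List (List Char)) (even : Bool) (s e : Int) : Int × Int :=
  match segs with
  | [] => (s, e)
  | h :: r =>
    if even then pvBFoldP r false (s + (h.length : Int)) e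
    else pvBFoldP r true s (e - (h.length : Int))

lemma pvSplitR_ne_nil (l : List Char) : pvSplitR l ≠ [] := by
  cases l with
  | nil => simp [pvSplitR]
  | cons c t =>
    simp only [pvSplitR]
    split
    · simp
    · cases h : pvSplitR t <;> simp

lemma pvSplitR_length (l : List Char) :
    (pvSplitR l).length = (l.count 'R') + 1 := by
  induction l with
  | nil => simp [pvSplitR]
  | cons c t ih =>
    simp only [pvSplitR]
    split
    · subst ‹c = 'R'›
      simp [List.count_cons, ih]
    · rename_i hc
      cases h : pvSplitR t with
      | nil => exact absurd h (pvSplitR_ne_nil t)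
      | cons hh r =>
        have := ih
        rw [h] at this
        simp only [List.length_cons] at this
        simp [List.count_cons, hc]
        omega

lemma pvModTwo (i : Int) : PySem.Int.mod i 2 = i % 2 := by
  simp [PySem.Int.mod, Int.fmod_eq_emod_of_nonneg _ (by norm_num : (0:Int) ≤ 2)]

lemma pvInt_mod_two_even (i : Int) :
    (PySem.Int.mod (i + 1) 2 == 0) = !(PySem.Int.mod i 2 == 0) := by
  rw [pvModTwo, pvModTwo]
  rcases Int.emod_two_eq_zero_or_one i with h | h
  · have : (i + 1) % 2 = 1 := by omega
    simp [this, h]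
  · have : (i + 1) % 2 = 0 := by omega
    simp [this, h]

-- B's enumerate-fold equals the parity-flag fold
lemma pvBFold_eq (segs : List (List Char)) (i : Int) (s e : Int) :
    (PySem.List.enumerate segs i).foldl pvBStep (s, e) =
      pvBFoldP segs (PySem.Int.mod i 2 == 0) s e := by
  induction segs generalizing i s e with
  | nil => simp [PySem.List.enumerate_nil, pvBFoldP]
  | cons h r ih =>
    rw [PySem.List.enumerate_cons]
    simp only [List.foldl_cons]
    by_cases hp : (PySem.Int.mod i 2 == 0) = true
    · simp only [pvBStep, hp, if_pos rfl, pvBFoldP]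
      rw [ih, pvInt_mod_two_even, hp]
      simp
    · have hp' : (PySem.Int.mod i 2 == 0) = false := by
        revert hp; cases (PySem.Int.mod i 2 == 0) <;> simp
      simp only [pvBStep, hp', Bool.false_eq_true, if_false, pvBFoldP]
      rw [ih, pvInt_mod_two_even, hp']
      simp

-- pushing one non-R char into the head segment shifts the accumulator by one
lemma pvBFoldP_cons_head (c : Char) (h : List Char) (r : List (List Char))
    (even : Bool) (s e : Int) :
    pvBFoldP ((c :: h) :: r) even s e =
      if even then pvBFoldP (h :: r) even (s + 1) e
      else pvBFoldP (h :: r) even s (e - 1) := by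
  cases even <;> simp [pvBFoldP] <;> ring_nf

-- main invariant: A's char fold = B's segment fold, for any start state
lemma pvMain (l : List Char) (rev : Bool) (s e : Int) :
    l.foldl pvAStep (rev, s, e) =
      ((rev ^^ (l.count 'R' % 2 == 1)),
       ((pvBFoldP (pvSplitR l) (!rev) s e).1),
       ((pvBFoldP (pvSplitR l) (!rev) s e).2)) := by
  induction l generalizing rev s e with
  | nil => simp [pvSplitR, pvBFoldP]
  | cons c t ih =>
    simp only [List.foldl_cons, pvAStep]
    by_cases hc : c = 'R'
    · subst hc
      simp only [if_pos rfl]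
      rw [ih]
      have hsplit : pvSplitR ('R' :: t) = [] :: pvSplitR t := by simp [pvSplitR]
      rw [hsplit]
      have hfold : ∀ b s' e', pvBFoldP ([] :: pvSplitR t) b s' e' =
          pvBFoldP (pvSplitR t) (!b) s' e' := by
        intro b s' e'; cases b <;> simp [pvBFoldP]
      rw [hfold]
      have hcnt : ('R' :: t).count 'R' = t.count 'R' + 1 := by
        simp [List.count_cons]
      rw [hcnt]
      refine Prod.ext ?_ rfl
      simp only [Bool.not_not]
      rcases Nat.even_or_odd (t.count 'R') with he | ho
      · have h0 : t.count 'R' % 2 = 0 := Nat.even_iff.mp he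
        have h1 : (t.count 'R' + 1) % 2 = 1 := by omega
        simp [h0, h1]
      · have h0 : t.count 'R' % 2 = 1 := Nat.odd_iff.mp ho
        have h1 : (t.count 'R' + 1) % 2 = 0 := by omega
        simp [h0, h1]
    · simp only [if_neg hc]
      have hsplit : ∃ h r, pvSplitR t = h :: r := by
        cases hsp : pvSplitR t with
        | nil => exact absurd hsp (pvSplitR_ne_nil t)
        | cons h r => exact ⟨h, r, rfl⟩
      obtain ⟨hd, r, hsp⟩ := hsplit
      have hsplit2 : pvSplitR (c :: t) = (c :: hd) :: r := by
        simp [pvSplitR, hc, hsp]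
      rw [hsplit2]
      have hcnt : (c :: t).count 'R' = t.count 'R' := by
        simp [List.count_cons, hc]
      rw [hcnt]
      cases rev with
      | false =>
        simp only [Bool.not_false, if_pos rfl]
        rw [pvBFoldP_cons_head]
        simp only [if_pos rfl]
        rw [← hsp, ih]
        simp
      | true =>
        simp only [Bool.not_true, Bool.false_eq_true, if_false]
        rw [pvBFoldP_cons_head]
        simp only [Bool.false_eq_true, if_false]
        rw [← hsp, ih]
        simp

lemma pvRevFlag (l : List Char) :
    (PySem.Int.mod (((pvSplitR l).length : Int) - 1) 2 == 1) =
      (l.count 'R' % 2 == 1) := by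
  rw [pvSplitR_length]
  have h : ((l.count 'R' + 1 : Nat) : Int) - 1 = (l.count 'R' : Int) := by push_cast; ring
  rw [h, pvModTwo]
  rcases Nat.even_or_odd (l.count 'R') with he | ho
  · have h0 : l.count 'R' % 2 = 0 := Nat.even_iff.mp he
    have h1 : (l.count 'R' : Int) % 2 = 0 := by omega
    simp [h0, h1]
  · have h0 : l.count 'R' % 2 = 1 := Nat.odd_iff.mp ho
    have h1 : (l.count 'R' : Int) % 2 = 1 := by omega
    simp [h0, h1]

-- ===== VERDICT (by name: the statement is the Claim_ definition above) =====
theorem analyze_commands_spec : Claim_equal_analyze_commands := by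
  intro p n _
  unfold Spec_analyze_commands analyze_commands analyze_commands_alt
  rw [pvBFold_eq]
  have hm : (PySem.Int.mod 0 2 == 0) = true := by decide
  rw [hm, pvMain p.toList false 0 (n - 1), pvRevFlag]
  simp
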